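-- pv_equiv track=rewrite | github.com/atul1805/DecafCompiler | hw6/cfg.py | createRIG
-- ===== SOURCE A (Python) =====
-- def createRIG(InList):
--     graph = {}
--     for In in InList:
--         for reg in In:
--             if reg not in graph:
--                 graph[reg] = set()
--             for otherReg in In:
--                 if str(reg) != str(otherReg):
--                     graph[reg].add(otherReg)
--     return graph
-- ===== SOURCE B (Python) =====
-- def createRIG(InList):
--     # pass 1: discover the node set in first-occurrence order
--     order = []
--     for In in InList:
--         for reg in In:
--             if reg not in order:
--                 order.append(reg)
--     # pass 2: compute each node's complete neighbour set independently,
--     # by one scan over all live-sets that contain it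
--     graph = {}
--     for reg in order:
--         nbrs = set()
--         for S in InList:
--             if reg in S:
--                 for o in S:
--                     if str(o) != str(reg):
--                         nbrs.add(o)
--         graph[reg] = nbrs
--     return graph
-- ===== Notes on version B (the rewrite author's own statement) =====
-- stated objective: alternative
-- what changed: Inverts the traversal: instead of A's single pass that mutates a growing graph set-by-set, B first computes the node list in first-occurrence order, then builds each node's complete neighbour set independently by one scan over the live-sets containing it.
import Mathlib
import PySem

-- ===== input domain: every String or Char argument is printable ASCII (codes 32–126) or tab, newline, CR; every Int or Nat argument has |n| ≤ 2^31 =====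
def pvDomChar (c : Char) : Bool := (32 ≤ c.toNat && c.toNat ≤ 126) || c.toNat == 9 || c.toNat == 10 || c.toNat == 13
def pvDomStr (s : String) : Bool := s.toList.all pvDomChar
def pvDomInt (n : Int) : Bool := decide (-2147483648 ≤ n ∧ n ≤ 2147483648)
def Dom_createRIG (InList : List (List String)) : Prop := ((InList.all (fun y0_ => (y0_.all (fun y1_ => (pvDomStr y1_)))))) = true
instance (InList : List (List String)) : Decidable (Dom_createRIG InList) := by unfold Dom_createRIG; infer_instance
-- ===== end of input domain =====

-- B inverts the traversal: instead of A's single pass mutating a growing graph set-by-set,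
-- B first lists the nodes in first-occurrence order, then computes each node's complete
-- neighbour set independently by one scan over the live-sets containing it;
-- objective: alternative decomposition.

-- ===== PORT A =====
def createRIG (InList : List (List String)) : List (String × List String) :=
  (InList.foldl (fun graph In =>
      In.foldl (fun graph reg =>
        In.foldl (fun g otherReg =>
            if reg ≠ otherReg then
              g.modify reg PySem.Set.empty (fun s => PySem.Set.add s otherReg)
            else g)
          -- 'if reg not in graph: graph[reg] = set()'
          (if graph.contains reg then graph else graph.insert reg PySem.Set.empty)) graph)
    PySem.Dict.empty).items

-- ===== PORT B =====
-- pass 1 of Source B: node list in first-occurrence order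
def pvOrder (InList : List (List String)) : List String :=
  InList.foldl (fun order In =>
    In.foldl (fun order reg => if reg ∈ order then order else order ++ [reg]) order) []

-- the per-reg 'nbrs' computation of Source B (scan of all live-sets containing reg)
def pvNbrs (InList : List (List String)) (reg : String) : PySem.Set String :=
  InList.foldl (fun nbrs S =>
    if reg ∈ S then
      S.foldl (fun nbrs o => if o ≠ reg then PySem.Set.add nbrs o else nbrs) nbrs
    else nbrs) PySem.Set.empty

def createRIG_alt (InList : List (List String)) : List (String × List String) :=
  ((pvOrder InList).foldl (fun g reg => g.insert reg (pvNbrs InList reg))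
    PySem.Dict.empty).items

-- ===== PRECONDITION & SPEC =====
def Spec_createRIG (InList : List (List String)) (out : List (String × List String)) : Prop := out = createRIG_alt InList
instance (InList : List (List String)) (out : List (String × List String)) : Decidable (Spec_createRIG InList out) := by unfold Spec_createRIG; infer_instance

-- ===== CLAIM (what is proved, stated in full; the proofs are below) =====
def Claim_equal_createRIG : Prop := ∀ (InList : List (List String)), Dom_createRIG InList → Spec_createRIG InList (createRIG InList)

-- ===== LEMMAS AND PROOFS =====

abbrev RIGd := PySem.Dict String (PySem.Set String)

theorem mk_items (d : RIGd) : PySem.Dict.mk d.items = d := rfl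

-- A's per-In key-creation phase, phase-separated out of its fused loop (proof-only)
def pvEnsAll (d : RIGd) (In : List String) : RIGd :=
  In.foldl (fun g r => g.setdefault r PySem.Set.empty) d

-- entry transformer (proof-only): what one In does to a single association-list entry of A's graph
def updF (L In : List String) (p : String × PySem.Set String) : String × PySem.Set String :=
  if p.1 ∈ L then (p.1, PySem.Set.update p.2 (In.filter (fun x => x != p.1))) else p

theorem keys_mk_map (its : List (String × PySem.Set String))
    (h : (String × PySem.Set String) → (String × PySem.Set String)) (hh : ∀ p, (h p).1 = p.1) :
    (PySem.Dict.mk (its.map h)).keys = (PySem.Dict.mk its).keys := by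
  simp only [PySem.Dict.keys, List.map_map]
  exact List.map_congr_left (fun p _ => hh p)

theorem contains_mk_map (its : List (String × PySem.Set String))
    (h : (String × PySem.Set String) → (String × PySem.Set String)) (hh : ∀ p, (h p).1 = p.1)
    (k : String) :
    (PySem.Dict.mk (its.map h)).contains k = (PySem.Dict.mk its).contains k := by
  simp only [PySem.Dict.contains, List.any_map]
  congr 1
  funext p
  simp [Function.comp, hh p]

theorem find?_nodup_keys (its : List (String × PySem.Set String)) (p : String × PySem.Set String)
    (hnd : (its.map (fun q => q.1)).Nodup) (hp : p ∈ its) :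
    its.find? (fun q => q.1 == p.1) = some p := by
  induction its with
  | nil => cases hp
  | cons q t ih =>
    simp only [List.map_cons, List.nodup_cons] at hnd
    rcases List.mem_cons.mp hp with rfl | hpt
    · rw [List.find?_cons_of_pos (by simp)]
    · have hne : q.1 ≠ p.1 := by
        intro h
        exact hnd.1 (h ▸ List.mem_map_of_mem hpt)
      rw [List.find?_cons_of_neg (by simp [hne])]
      exact ih hnd.2 hpt

theorem getD_entry (d : RIGd) (p : String × PySem.Set String) (dflt : PySem.Set String)
    (hp : p ∈ d.items) (hnd : d.keys.Nodup) : d.getD p.1 dflt = p.2 := by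
  have hf : d.items.find? (fun q => q.1 == p.1) = some p :=
    find?_nodup_keys d.items p (by simpa [PySem.Dict.keys] using hnd) hp
  simp [PySem.Dict.getD, PySem.Dict.get?, hf]

theorem modify_items_of_contains (d : RIGd) (k : String) (f : PySem.Set String → PySem.Set String)
    (hc : d.contains k = true) (hnd : d.keys.Nodup) :
    (d.modify k PySem.Set.empty f).items
      = d.items.map (fun p => if p.1 = k then (p.1, f p.2) else p) := by
  simp only [PySem.Dict.modify, PySem.Dict.insert, hc, if_true]
  refine List.map_congr_left (fun p hp => ?_)
  by_cases h : p.1 = k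
  · rw [← h]
    simp [getD_entry d p _ hp hnd]
  · simp [h]

theorem nodup_keys_setdefault (d : RIGd) (r : String) (hnd : d.keys.Nodup) :
    (d.setdefault r PySem.Set.empty).keys.Nodup := by
  by_cases hc : d.contains r = true
  · rw [PySem.Dict.setdefault_of_contains d PySem.Set.empty hc]; exact hnd
  · have hc' : d.contains r = false := by simpa using hc
    have hr : r ∉ d.keys := fun hm => hc ((PySem.Dict.contains_iff_mem_keys d r).mpr hm)
    rw [PySem.Dict.setdefault_of_not_contains d PySem.Set.empty hc']
    simp only [PySem.Dict.insert, hc', Bool.false_eq_true, if_false]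
    simp only [PySem.Dict.keys, List.map_append, List.map_cons, List.map_nil] at hr hnd ⊢
    refine List.Nodup.append hnd (List.nodup_singleton _) ?_
    intro a ha hb
    simp only [List.mem_singleton] at hb
    subst hb
    exact hr ha

-- the setdefault pass commutes with an entry-wise map that fixes keys (phase-separates A)
theorem pvEnsAll_map_comm (In : List String) (d : RIGd)
    (h : (String × PySem.Set String) → (String × PySem.Set String)) (hh : ∀ p, (h p).1 = p.1)
    (hfix : ∀ x, d.contains x = false → h (x, PySem.Set.empty) = (x, PySem.Set.empty)) :
    (pvEnsAll (PySem.Dict.mk (d.items.map h)) In).items = (pvEnsAll d In).items.map h := by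
  induction In generalizing d with
  | nil => rfl
  | cons r t ih =>
    show (pvEnsAll ((PySem.Dict.mk (d.items.map h)).setdefault r PySem.Set.empty) t).items
        = (pvEnsAll (d.setdefault r PySem.Set.empty) t).items.map h
    have hcm : (PySem.Dict.mk (d.items.map h)).contains r = d.contains r := by
      rw [contains_mk_map d.items h hh r, mk_items]
    by_cases hc : d.contains r = true
    · rw [PySem.Dict.setdefault_of_contains _ PySem.Set.empty (hcm.trans hc),
        PySem.Dict.setdefault_of_contains d PySem.Set.empty hc]
      exact ih d hfix
    · have hc' : d.contains r = false := by simpa using hc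
      have e1 : (PySem.Dict.mk (d.items.map h)).setdefault r PySem.Set.empty
          = PySem.Dict.mk ((d.setdefault r PySem.Set.empty).items.map h) := by
        rw [PySem.Dict.setdefault_of_not_contains _ PySem.Set.empty (hcm.trans hc'),
          PySem.Dict.setdefault_of_not_contains d PySem.Set.empty hc']
        apply PySem.Dict.ext
        simp [PySem.Dict.insert, hcm, hc']
        exact (hfix r hc').symm
      rw [e1]
      refine ih (d.setdefault r PySem.Set.empty) (fun x hx => ?_)
      have hx' : d.contains x = false := by
        by_contra hcx
        have hcx' : d.contains x = true := by simpa using hcx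
        rw [PySem.Dict.contains_setdefault, hcx'] at hx
        simp at hx
      exact hfix x hx'

-- PySem.Set facts specific to these loops
theorem set_update_idem (s : PySem.Set String) (l : List String) :
    PySem.Set.update (PySem.Set.update s l) l = PySem.Set.update s l := by
  rw [PySem.Set.update_eq_append_filter (PySem.Set.update s l) l]
  have hnil : (PySem.Set.ofList l).filter
      (fun y => !(PySem.Set.contains (PySem.Set.update s l) y)) = [] := by
    refine List.filter_eq_nil_iff.mpr (fun y hy => ?_)
    have hyl : y ∈ l := (PySem.Set.mem_ofList l y).mp hy
    have hmem : y ∈ PySem.Set.update s l := (PySem.Set.mem_update s l y).mpr (Or.inr hyl)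
    simp [PySem.Set.contains, hmem]
  rw [hnil, List.append_nil]

-- inner loop of A as an entry-wise map
theorem innerA_items (In : List String) (reg : String) (d : RIGd)
    (hnd : d.keys.Nodup) (hc : d.contains reg = true) :
    (In.foldl (fun g o => if reg ≠ o then
        g.modify reg PySem.Set.empty (fun s => PySem.Set.add s o) else g) d).items
      = d.items.map (fun p => if p.1 = reg then
          (p.1, PySem.Set.update p.2 (In.filter (fun x => x != reg))) else p) := by
  induction In generalizing d with
  | nil =>
    show d.items = _
    conv_lhs => rw [← List.map_id d.items]
    refine List.map_congr_left (fun p _ => ?_)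
    obtain ⟨k, v⟩ := p
    by_cases hk : k = reg <;> simp [hk]
  | cons o t ih =>
    by_cases ho : reg = o
    · subst ho
      rw [List.foldl_cons, if_neg (by simp), ih d hnd hc]
      have hfil : List.filter (fun x => x != reg) (reg :: t)
          = List.filter (fun x => x != reg) t := by
        rw [List.filter_cons, if_neg (by simp)]
      rw [hfil]
    · have hne : reg ≠ o := ho
      rw [List.foldl_cons, if_pos hne]
      have hitems : (d.modify reg PySem.Set.empty (fun s => PySem.Set.add s o)).items
          = d.items.map (fun p => if p.1 = reg then (p.1, PySem.Set.add p.2 o) else p) :=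
        modify_items_of_contains d reg _ hc hnd
      have hfst : ∀ p : String × PySem.Set String,
          ((fun p => if p.1 = reg then (p.1, PySem.Set.add p.2 o) else p) p).1 = p.1 := by
        intro p; dsimp only; split <;> rfl
      have hmk : d.modify reg PySem.Set.empty (fun s => PySem.Set.add s o)
          = PySem.Dict.mk (d.items.map (fun p => if p.1 = reg then (p.1, PySem.Set.add p.2 o) else p)) :=
        PySem.Dict.ext hitems
      have hnd1 : (d.modify reg PySem.Set.empty (fun s => PySem.Set.add s o)).keys.Nodup := by
        rw [hmk, keys_mk_map _ _ hfst, mk_items]; exact hnd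
      have hc1 : (d.modify reg PySem.Set.empty (fun s => PySem.Set.add s o)).contains reg = true := by
        rw [hmk, contains_mk_map _ _ hfst, mk_items]; exact hc
      rw [ih _ hnd1 hc1, hitems, List.map_map]
      refine List.map_congr_left (fun p _ => ?_)
      obtain ⟨k, v⟩ := p
      have hob : (o != reg) = true := bne_iff_ne.mpr (fun hh => hne hh.symm)
      have hfil : List.filter (fun x => x != reg) (o :: t)
          = o :: List.filter (fun x => x != reg) t := by
        rw [List.filter_cons, if_pos hob]
      by_cases hk : k = reg
      · subst hk
        simp [hfil, PySem.Set.update_cons]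
      · simp [hk]

-- A's per-In loop (keys pass fused with edge pass) phase-separated into ensure-then-map
theorem loopA_items (L In : List String) (d : RIGd) (hnd : d.keys.Nodup) :
    (L.foldl (fun graph reg =>
        In.foldl (fun g o => if reg ≠ o then
            g.modify reg PySem.Set.empty (fun s => PySem.Set.add s o) else g)
          (if graph.contains reg then graph else graph.insert reg PySem.Set.empty)) d).items
      = (pvEnsAll d L).items.map (updF L In) := by
  induction L generalizing d with
  | nil =>
    show d.items = _
    conv_lhs => rw [← List.map_id d.items]
    refine List.map_congr_left (fun p _ => ?_)
    obtain ⟨k, v⟩ := p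
    simp [updF]
  | cons r t ih =>
    rw [List.foldl_cons]
    have hens : (if d.contains r then d else d.insert r PySem.Set.empty)
        = d.setdefault r PySem.Set.empty := by
      by_cases hc : d.contains r = true <;>
        simp [PySem.Dict.setdefault, PySem.Dict.insert, hc]
    rw [hens]
    have hnde : (d.setdefault r PySem.Set.empty).keys.Nodup := nodup_keys_setdefault d r hnd
    have hce : (d.setdefault r PySem.Set.empty).contains r = true := by
      rw [PySem.Dict.contains_setdefault]; simp
    have hinner : (In.foldl (fun g o => if r ≠ o then
        g.modify r PySem.Set.empty (fun s => PySem.Set.add s o) else g)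
          (d.setdefault r PySem.Set.empty)).items
        = (d.setdefault r PySem.Set.empty).items.map
            (fun p => if p.1 = r then
              (p.1, PySem.Set.update p.2 (In.filter (fun x => x != r))) else p) :=
      innerA_items In r _ hnde hce
    have hfst1 : ∀ p : String × PySem.Set String,
        ((fun p => if p.1 = r then
          (p.1, PySem.Set.update p.2 (In.filter (fun x => x != r))) else p) p).1 = p.1 := by
      intro p; dsimp only; split <;> rfl
    have hmk1 : (In.foldl (fun g o => if r ≠ o then
        g.modify r PySem.Set.empty (fun s => PySem.Set.add s o) else g)
          (d.setdefault r PySem.Set.empty))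
        = PySem.Dict.mk ((d.setdefault r PySem.Set.empty).items.map
            (fun p => if p.1 = r then
              (p.1, PySem.Set.update p.2 (In.filter (fun x => x != r))) else p)) :=
      PySem.Dict.ext hinner
    have hnd1 : (In.foldl (fun g o => if r ≠ o then
        g.modify r PySem.Set.empty (fun s => PySem.Set.add s o) else g)
          (d.setdefault r PySem.Set.empty)).keys.Nodup := by
      rw [hmk1, keys_mk_map _ _ hfst1, mk_items]; exact hnde
    rw [ih _ hnd1, hmk1]
    have hcomm : (pvEnsAll (PySem.Dict.mk ((d.setdefault r PySem.Set.empty).items.map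
          (fun p => if p.1 = r then
            (p.1, PySem.Set.update p.2 (In.filter (fun x => x != r))) else p))) t).items
        = (pvEnsAll (d.setdefault r PySem.Set.empty) t).items.map
            (fun p => if p.1 = r then
              (p.1, PySem.Set.update p.2 (In.filter (fun x => x != r))) else p) := by
      refine pvEnsAll_map_comm t _ _ hfst1 (fun x hx => ?_)
      have hxr : ¬ x = r := by
        intro hh; rw [hh, hce] at hx; cases hx
      dsimp only; rw [if_neg hxr]
    rw [hcomm, List.map_map]
    show _ = ((pvEnsAll (d.setdefault r PySem.Set.empty) t).items).map (updF (r :: t) In)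
    refine List.map_congr_left (fun p _ => ?_)
    obtain ⟨k, v⟩ := p
    by_cases hk : k = r
    · subst hk
      by_cases hkt : k ∈ t
      · simp [updF, hkt, set_update_idem]
      · simp [updF, hkt]
    · by_cases hkt : k ∈ t <;> simp [updF, hk, hkt]

-- ===== order-list lemmas (proof-only) =====

-- the inner order-extension step of pvOrder, as a named function
def ordExt (order In : List String) : List String :=
  In.foldl (fun o r => if r ∈ o then o else o ++ [r]) order

theorem pvOrder_eq_foldl (InList : List (List String)) :
    pvOrder InList = InList.foldl ordExt [] := rfl

theorem mem_ordExt (In order : List String) (x : String) :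
    x ∈ ordExt order In ↔ x ∈ order ∨ x ∈ In := by
  induction In generalizing order with
  | nil => simp [ordExt]
  | cons r t ih =>
    show x ∈ ordExt (if r ∈ order then order else order ++ [r]) t ↔ _
    by_cases hr : r ∈ order
    · rw [if_pos hr, ih]
      constructor
      · rintro (h | h)
        · exact Or.inl h
        · exact Or.inr (List.mem_cons_of_mem _ h)
      · rintro (h | h)
        · exact Or.inl h
        · rcases List.mem_cons.mp h with rfl | h
          · exact Or.inl hr
          · exact Or.inr h
    · rw [if_neg hr, ih]
      simp only [List.mem_append, List.mem_cons]
      tauto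

theorem nodup_ordExt (In order : List String) (hnd : order.Nodup) : (ordExt order In).Nodup := by
  induction In generalizing order with
  | nil => exact hnd
  | cons r t ih =>
    show (ordExt (if r ∈ order then order else order ++ [r]) t).Nodup
    by_cases hr : r ∈ order
    · rw [if_pos hr]; exact ih order hnd
    · rw [if_neg hr]
      refine ih _ ?_
      refine List.Nodup.append hnd (List.nodup_singleton _) ?_
      intro a ha hb
      simp only [List.mem_singleton] at hb
      subst hb
      exact hr ha

theorem mem_pvOrder (InList : List (List String)) (x : String) :
    x ∈ pvOrder InList ↔ ∃ S ∈ InList, x ∈ S := by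
  rw [pvOrder_eq_foldl]
  have gen : ∀ (P : List (List String)) (order : List String),
      x ∈ P.foldl ordExt order ↔ x ∈ order ∨ ∃ S ∈ P, x ∈ S := by
    intro P
    induction P with
    | nil => simp
    | cons S t ih =>
      intro order
      rw [List.foldl_cons, ih, mem_ordExt]
      simp only [List.mem_cons]
      constructor
      · rintro ((h | h) | ⟨T, hT, hx⟩)
        · exact Or.inl h
        · exact Or.inr ⟨S, Or.inl rfl, h⟩
        · exact Or.inr ⟨T, Or.inr hT, hx⟩
      · rintro (h | ⟨T, rfl | hT, hx⟩)
        · exact Or.inl (Or.inl h)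
        · exact Or.inl (Or.inr hx)
        · exact Or.inr ⟨T, hT, hx⟩
  rw [gen]
  simp

theorem nodup_pvOrder (InList : List (List String)) : (pvOrder InList).Nodup := by
  rw [pvOrder_eq_foldl]
  have gen : ∀ (P : List (List String)) (order : List String), order.Nodup →
      (P.foldl ordExt order).Nodup := by
    intro P
    induction P with
    | nil => exact fun _ h => h
    | cons S t ih => exact fun order h => ih _ (nodup_ordExt S order h)
  exact gen InList [] List.nodup_nil

theorem pvOrder_append_singleton (P : List (List String)) (In : List String) :
    pvOrder (P ++ [In]) = ordExt (pvOrder P) In := by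
  rw [pvOrder_eq_foldl, pvOrder_eq_foldl, List.foldl_append]
  rfl

-- ===== pvNbrs lemmas (proof-only) =====

theorem inner_fold_update (S : List String) (r : String) (nb : PySem.Set String) :
    S.foldl (fun nb o => if o ≠ r then PySem.Set.add nb o else nb) nb
      = PySem.Set.update nb (S.filter (fun x => x != r)) := by
  induction S generalizing nb with
  | nil => simp [PySem.Set.update_nil]
  | cons o t ih =>
    by_cases ho : o = r
    · subst ho
      rw [List.foldl_cons, if_neg (by simp), ih,
        List.filter_cons, if_neg (by simp)]
    · rw [List.foldl_cons, if_pos ho, ih, List.filter_cons,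
        if_pos (bne_iff_ne.mpr ho), PySem.Set.update_cons]

theorem pvNbrs_append_singleton (P : List (List String)) (In : List String) (r : String) :
    pvNbrs (P ++ [In]) r
      = if r ∈ In then PySem.Set.update (pvNbrs P r) (In.filter (fun x => x != r))
        else pvNbrs P r := by
  rw [pvNbrs, List.foldl_append]
  show (if r ∈ In then In.foldl _ (pvNbrs P r) else pvNbrs P r) = _
  by_cases hr : r ∈ In
  · rw [if_pos hr, if_pos hr, inner_fold_update]
  · rw [if_neg hr, if_neg hr]

theorem pvNbrs_empty_of_not_mem (P : List (List String)) (r : String)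
    (h : ∀ S ∈ P, r ∉ S) : pvNbrs P r = PySem.Set.empty := by
  induction P with
  | nil => rfl
  | cons S t ih =>
    show (t.foldl _ (if r ∈ S then _ else PySem.Set.empty)) = _
    rw [if_neg (h S List.mem_cons_self)]
    exact ih (fun T hT => h T (List.mem_cons_of_mem _ hT))

-- ===== the pvEnsAll characterisation on an order-shaped dict =====

theorem contains_mk_order (order : List String) (f : String → PySem.Set String) (k : String) :
    (PySem.Dict.mk (order.map (fun r => (r, f r)))).contains k = decide (k ∈ order) := by
  by_cases hk : k ∈ order
  · simp only [hk, decide_true]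
    exact (PySem.Dict.contains_iff_mem_keys _ k).mpr (by simp [PySem.Dict.keys, List.map_map, hk])
  · simp only [hk, decide_false]
    by_contra hc
    have : k ∈ (PySem.Dict.mk (order.map (fun r => (r, f r)))).keys :=
      (PySem.Dict.contains_iff_mem_keys _ k).mp (by simpa using hc)
    simp [PySem.Dict.keys, List.map_map] at this
    exact hk this

theorem ens_items (In : List String) (order : List String) (f : String → PySem.Set String)
    (hnd : order.Nodup) :
    (pvEnsAll (PySem.Dict.mk (order.map (fun r => (r, f r)))) In).items
      = (ordExt order In).map (fun r => (r, if r ∈ order then f r else PySem.Set.empty)) := by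
  induction In generalizing order f with
  | nil =>
    show (order.map _) = _
    refine (List.map_congr_left (fun r hr => ?_)).symm
    rw [if_pos hr]
  | cons r t ih =>
    show (pvEnsAll ((PySem.Dict.mk (order.map (fun x => (x, f x)))).setdefault r PySem.Set.empty) t).items = _
    by_cases hr : r ∈ order
    · rw [PySem.Dict.setdefault_of_contains _ _ (by rw [contains_mk_order]; simpa),
        ih order f hnd]
      show _ = _
      have : ordExt order (r :: t) = ordExt order t := by
        show ordExt (if r ∈ order then order else order ++ [r]) t = _
        rw [if_pos hr]
      rw [this]
    · have hc : (PySem.Dict.mk (order.map (fun x => (x, f x)))).contains r = false := by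
        rw [contains_mk_order]; simpa
      rw [PySem.Dict.setdefault_of_not_contains _ _ hc]
      have hins : (PySem.Dict.mk (order.map (fun x => (x, f x)))).insert r PySem.Set.empty
          = PySem.Dict.mk ((order ++ [r]).map
              (fun x => (x, if x = r then PySem.Set.empty else f x))) := by
        apply PySem.Dict.ext
        rw [PySem.Dict.items_insert_of_not_contains _ _ hc]
        show order.map _ ++ [(r, PySem.Set.empty)] = _
        rw [List.map_append]
        congr 1
        · refine List.map_congr_left (fun x hx => ?_)
          have : ¬ x = r := fun h => hr (h ▸ hx)
          rw [if_neg this]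
        · simp
      rw [hins, ih (order ++ [r]) _ (by
        refine List.Nodup.append hnd (List.nodup_singleton _) ?_
        intro a ha hb
        simp only [List.mem_singleton] at hb
        subst hb
        exact hr ha)]
      have hord : ordExt order (r :: t) = ordExt (order ++ [r]) t := by
        show ordExt (if r ∈ order then order else order ++ [r]) t = _
        rw [if_neg hr]
      rw [hord]
      refine List.map_congr_left (fun x _ => ?_)
      by_cases hx : x ∈ order
      · have hxr : ¬ x = r := fun h => hr (h ▸ hx)
        rw [if_pos (List.mem_append_left _ hx), if_neg hxr, if_pos hx]
      · by_cases hxr : x = r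
        · subst hxr
          rw [if_pos (List.mem_append_right _ (List.mem_singleton_self _)), if_pos rfl,
            if_neg hx]
        · have : ¬ x ∈ order ++ [r] := by
            simp only [List.mem_append, List.mem_singleton]
            tauto
          rw [if_neg this, if_neg hx]

-- ===== one In step of A on an order-shaped dict =====

theorem stepA_items (In order : List String) (f : String → PySem.Set String)
    (hnd : order.Nodup) :
    ((In.foldl (fun graph reg =>
        In.foldl (fun g o => if reg ≠ o then
            g.modify reg PySem.Set.empty (fun s => PySem.Set.add s o) else g)
          (if graph.contains reg then graph else graph.insert reg PySem.Set.empty))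
        (PySem.Dict.mk (order.map (fun r => (r, f r)))))).items
      = (ordExt order In).map (fun r =>
          (r, if r ∈ In then
                PySem.Set.update (if r ∈ order then f r else PySem.Set.empty)
                  (In.filter (fun x => x != r))
              else (if r ∈ order then f r else PySem.Set.empty))) := by
  have hkeys : (PySem.Dict.mk (order.map (fun r => (r, f r)))).keys = order := by
    simp [PySem.Dict.keys, List.map_map, Function.comp_def]
  rw [loopA_items In In _ (by rw [hkeys]; exact hnd)]
  rw [ens_items In order f hnd, List.map_map]
  refine List.map_congr_left (fun r _ => ?_)
  by_cases hrIn : r ∈ In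
  · simp [updF, hrIn]
  · simp [updF, hrIn]

-- ===== the main invariant for A =====

theorem stateA_eq (P : List (List String)) :
    (P.foldl (fun graph In =>
        In.foldl (fun graph reg =>
          In.foldl (fun g o => if reg ≠ o then
              g.modify reg PySem.Set.empty (fun s => PySem.Set.add s o) else g)
            (if graph.contains reg then graph else graph.insert reg PySem.Set.empty)) graph)
      PySem.Dict.empty)
      = PySem.Dict.mk ((pvOrder P).map (fun r => (r, pvNbrs P r))) := by
  induction P using List.reverseRecOn with
  | nil => rfl
  | append_singleton P In ih =>
    rw [List.foldl_append, List.foldl_cons, List.foldl_nil, ih]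
    apply PySem.Dict.ext
    rw [stepA_items In (pvOrder P) (pvNbrs P) (nodup_pvOrder P)]
    rw [pvOrder_append_singleton]
    refine List.map_congr_left (fun r hr => ?_)
    rw [pvNbrs_append_singleton]
    by_cases hro : r ∈ pvOrder P
    · rw [if_pos hro]
    · have hrIn : r ∈ In := by
        rcases (mem_ordExt In (pvOrder P) r).mp hr with h | h
        · exact absurd h hro
        · exact h
      have hempty : pvNbrs P r = PySem.Set.empty :=
        pvNbrs_empty_of_not_mem P r (fun S hS hrS =>
          hro ((mem_pvOrder P r).mpr ⟨S, hS, hrS⟩))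
      rw [if_neg hro, if_pos hrIn, if_pos hrIn, hempty]

-- ===== B's dict as a map over pvOrder =====

theorem altB_items (InList : List (List String)) :
    createRIG_alt InList = (pvOrder InList).map (fun r => (r, pvNbrs InList r)) := by
  unfold createRIG_alt
  rw [PySem.Dict.items_foldl_insert_fresh (pvOrder InList) (fun r => r)
      (fun r => pvNbrs InList r) PySem.Dict.empty
      (fun a _ => PySem.Dict.contains_empty a)
      (by simpa using nodup_pvOrder InList)]
  simp [PySem.Dict.empty]

-- ===== VERDICT (by name: the statement is the Claim_ definition above) =====
theorem createRIG_spec : Claim_equal_createRIG := by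
  intro InList _
  show createRIG InList = createRIG_alt InList
  unfold createRIG
  rw [stateA_eq InList, altB_items InList]
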